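-- pv_equiv track=rewrite | github.com/pypi-data/pypi-mirror-368 | packages/litex-kernel/litex_kernel-0.1.8.tar.gz/litex_kernel-0.1.8/litex_kernel/kernel.py | code_formatter
-- ===== SOURCE A (Python) =====
-- def code_formatter(code):
--     litex_indentation = " " * 4
--     code_lines = code.splitlines()
--     formatted_lines = []
--     for index, line in enumerate(code_lines):
--         is_last_line = index >= len(code_lines) - 1
--         if line.strip() == "":
--             continue
--         elif line.startswith(litex_indentation) and (
--             is_last_line
--             or not code_lines[index + 1].rstrip().startswith(litex_indentation)
--         ):
--             formatted_lines.append(line.rstrip())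
--             formatted_lines.append("")
--         else:
--             formatted_lines.append(line.rstrip())
--     return "\n".join(formatted_lines)
-- ===== SOURCE B (Python) =====
-- def code_formatter(code):
--     buf = []
--     succ = None  # raw line seen after the current one (None = last line)
--     for line in reversed(code.splitlines()):
--         if line.strip() != "":
--             if line.startswith("    ") and (
--                 succ is None or not succ.rstrip().startswith("    ")
--             ):
--                 buf.append("")
--             buf.append(line.rstrip())
--         succ = line
--     buf.reverse()
--     return "\n".join(buf)
-- ===== Notes on version B (the rewrite author's own statement) =====
-- stated objective: alternative
-- what changed: Single reverse pass carrying the previously-seen raw line as successor state instead of a forward enumerate loop with an index lookahead into the line list.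
import Mathlib
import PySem

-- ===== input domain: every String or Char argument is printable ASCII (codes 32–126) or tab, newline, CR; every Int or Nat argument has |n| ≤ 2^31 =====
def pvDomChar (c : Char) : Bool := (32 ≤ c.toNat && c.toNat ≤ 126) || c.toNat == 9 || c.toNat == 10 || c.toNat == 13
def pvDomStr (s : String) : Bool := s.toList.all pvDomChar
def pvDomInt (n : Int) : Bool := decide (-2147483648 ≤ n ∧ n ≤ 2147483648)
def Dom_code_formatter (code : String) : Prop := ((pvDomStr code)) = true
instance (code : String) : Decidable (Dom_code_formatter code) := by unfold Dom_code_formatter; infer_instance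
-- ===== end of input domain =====

-- B is an alternative decomposition: one reverse pass with a carried successor line instead of a forward loop with an index lookahead; same cost.

-- ===== PORT A =====
-- literal transliteration of A: forward enumerate loop, lookahead code_lines[index+1]
-- (the pyGet? is only reached when index+1 is in range, so .getD "" is never used)
def pvStepA (code_lines : List String) (formatted_lines : List String)
    (p : Int × String) : List String :=
  let index := p.1
  let line := p.2
  let is_last_line : Bool := decide (index ≥ (code_lines.length : Int) - 1)
  if PySem.Str.strip line = "" then formatted_lines
  else if PySem.Str.startswith line "    " &&
      (is_last_line ||
        !(PySem.Str.startswith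
            (PySem.Str.rstrip ((PySem.List.pyGet? code_lines (index + 1)).getD "")) "    "))
  then formatted_lines ++ [PySem.Str.rstrip line] ++ [""]
  else formatted_lines ++ [PySem.Str.rstrip line]

def code_formatter (code : String) : String :=
  PySem.Str.join "\n"
    ((PySem.List.enumerate (PySem.Str.splitlines code)).foldl
      (pvStepA (PySem.Str.splitlines code)) [])

-- ===== PORT B =====
-- literal transliteration of B: fold over the reversed lines carrying (buffer, successor)
def pvStepB (st : List String × Option String) (line : String) :
    List String × Option String :=
  let buf :=
    if PySem.Str.strip line ≠ "" then
      let buf :=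
        if PySem.Str.startswith line "    " &&
            (match st.2 with
             | none => true
             | some succ => !(PySem.Str.startswith (PySem.Str.rstrip succ) "    "))
        then st.1 ++ [""] else st.1
      buf ++ [PySem.Str.rstrip line]
    else st.1
  (buf, some line)

def code_formatter_alt (code : String) : String :=
  PySem.Str.join "\n"
    (((PySem.Str.splitlines code).reverse.foldl pvStepB ([], none)).1.reverse)

-- ===== PRECONDITION & SPEC =====
def Spec_code_formatter (code : String) (out : String) : Prop := out = code_formatter_alt code
instance (code : String) (out : String) : Decidable (Spec_code_formatter code out) := by unfold Spec_code_formatter; infer_instance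

-- ===== CLAIM (what is proved, stated in full; the proofs are below) =====
def Claim_equal_code_formatter : Prop := ∀ (code : String), Dom_code_formatter code → Spec_code_formatter code (code_formatter code)

-- ===== LEMMAS AND PROOFS =====

-- common characterisation: the emitted line list, recursing with the successor line in view
def pvNextOk (o : Option String) : Bool :=
  match o with
  | none => true
  | some succ => !(PySem.Str.startswith (PySem.Str.rstrip succ) "    ")

def pvGo : List String → List String
  | [] => []
  | l :: rest =>
    if PySem.Str.strip l = "" then pvGo rest
    else if PySem.Str.startswith l "    " && pvNextOk rest.head?
    then PySem.Str.rstrip l :: "" :: pvGo rest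
    else PySem.Str.rstrip l :: pvGo rest

theorem stepB_foldr (ls : List String) :
    ls.reverse.foldl pvStepB ([], none) = ((pvGo ls).reverse, ls.head?) := by
  induction ls with
  | nil => rfl
  | cons l rest ih =>
    rw [List.reverse_cons, List.foldl_append, ih]
    simp only [List.foldl_cons, List.foldl_nil, pvStepB, pvGo, List.head?_cons]
    by_cases hs : PySem.Str.strip l = ""
    · simp [hs]
    · simp only [hs, ne_eq, not_false_iff, if_true]
      have : (match rest.head? with
              | none => true
              | some succ => !(PySem.Str.startswith (PySem.Str.rstrip succ) "    ")) =
             pvNextOk rest.head? := by cases rest.head? <;> rfl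
      rw [this]
      split_ifs <;> simp_all

theorem stepA_foldl (pre s : List String) (acc : List String) :
    (PySem.List.enumerate s (pre.length : Int)).foldl (pvStepA (pre ++ s)) acc =
      acc ++ pvGo s := by
  induction s generalizing pre acc with
  | nil => simp [PySem.List.enumerate_nil, pvGo]
  | cons l rest ih =>
    rw [PySem.List.enumerate_cons, List.foldl_cons]
    have hcast : ((pre.length : Int) + 1) = ((pre ++ [l]).length : Int) := by
      simp
    have happ : pre ++ l :: rest = (pre ++ [l]) ++ rest := by simp
    rw [happ, hcast, ih (pre ++ [l]), ← happ]
    -- now reduce the single step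
    have hget : PySem.List.pyGet? (pre ++ l :: rest) ((pre.length : Int) + 1) =
        rest.head? := by
      have : ((pre.length : Int) + 1) = ((pre.length + 1 : Nat) : Int) := by push_cast; ring
      rw [this, PySem.List.pyGet?_natCast]
      rw [List.getElem?_append_right (by omega)]
      simp [List.head?_eq_getElem?]
    have hlast : (decide ((pre.length : Int) ≥ ((pre ++ l :: rest).length : Int) - 1)) =
        rest.isEmpty := by
      cases rest <;> simp
    simp only [pvStepA, pvGo, hget, hlast]
    by_cases hs : PySem.Str.strip l = ""
    · simp [hs]
    · simp only [hs]
      have hcond : (PySem.Str.startswith l "    " &&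
          (rest.isEmpty ||
            !(PySem.Str.startswith
                (PySem.Str.rstrip ((rest.head?).getD "")) "    "))) =
          (PySem.Str.startswith l "    " && pvNextOk rest.head?) := by
        cases rest <;> simp [pvNextOk]
      rw [hcond]
      split_ifs <;> simp_all

-- ===== VERDICT (by name: the statement is the Claim_ definition above) =====
theorem code_formatter_spec : Claim_equal_code_formatter := by
  intro code _
  unfold Spec_code_formatter code_formatter code_formatter_alt
  have hA := stepA_foldl [] (PySem.Str.splitlines code) []
  simp only [List.nil_append, List.length_nil, Nat.cast_zero] at hA
  rw [hA, stepB_foldr]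
  simp
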